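-- pv_equiv track=rewrite | github.com/ingkoon/Algorithm | 이것이 코딩 테스트다/그렙1번.py | solution
-- ===== SOURCE A (Python) =====
-- def solution(arr):
--
--     arr.sort()
--
--     max_val = []
--     min_val = []
--
--     cnt = []
--
--     for i in range(0, 256):
--         for j in  arr:
--             if j >= i:
--                 max_val.append(i)
--             else:
--                 min_val.append(j)
--
--         val = len(max_val) - len(min_val)
--
--         if val < 0:
--             val = 999
--
--         cnt.append(val)
--
--         max_val = []
--         min_val = []
--
--     answer = cnt.index(min(cnt))
--
--     return answer
-- ===== SOURCE B (Python) =====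
-- def solution(arr):
--     # Histogram + running prefix count instead of a 256 x n nested scan.
--     # Note: unlike A, this does not sort `arr` in place (return value only).
--     n = len(arr)
--     hist = [0] * 256
--     neg = 0
--     for j in arr:
--         if j < 0:
--             neg += 1
--         elif j < 256:
--             hist[j] += 1
--     vals = []
--     lt = neg
--     for i in range(256):
--         v = n - 2 * lt
--         vals.append(999 if v < 0 else v)
--         lt += hist[i]
--     return vals.index(min(vals))
-- ===== Notes on version B (the rewrite author's own statement) =====
-- stated objective: faster
-- what changed: Replaces the sort plus 256 full scans of the array (building throwaway lists just to take their lengths) by a single histogram/negative-count pass and a running prefix count lt of elements < i, so each of the 256 candidate values is n - 2*lt in O(1).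
import Mathlib
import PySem

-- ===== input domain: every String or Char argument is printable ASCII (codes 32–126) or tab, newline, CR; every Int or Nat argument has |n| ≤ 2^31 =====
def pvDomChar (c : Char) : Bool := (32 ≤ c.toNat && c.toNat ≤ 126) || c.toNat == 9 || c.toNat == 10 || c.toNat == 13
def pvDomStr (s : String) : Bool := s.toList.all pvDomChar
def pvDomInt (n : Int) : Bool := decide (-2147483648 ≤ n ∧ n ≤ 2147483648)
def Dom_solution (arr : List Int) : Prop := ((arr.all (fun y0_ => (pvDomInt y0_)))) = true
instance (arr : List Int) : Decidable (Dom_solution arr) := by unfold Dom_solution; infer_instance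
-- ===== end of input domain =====

-- B replaces A's sort + 256 full scans by one histogram pass and a running prefix count (measured faster).
-- A sorts `arr` in place; B does not — the equivalence proved here is about the return value only.

-- ===== PORT A =====
def solution (arr : List Int) : Int :=
  let arr' := PySem.List.sorted arr (fun x => x) false
  let cnt := (PySem.List.pyRange 0 256 1).foldl (fun cnt i =>
      let p := arr'.foldl (fun (s : List Int × List Int) j =>
          if j ≥ i then (s.1 ++ [i], s.2) else (s.1, s.2 ++ [j])) ([], [])
      let val : Int := (p.1.length : Int) - (p.2.length : Int)
      let val := if val < 0 then (999 : Int) else val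
      cnt ++ [val]) ([] : List Int)
  (((PySem.List.index? cnt ((PySem.List.min? cnt (fun x => x)).getD 0)).getD 0 : Nat) : Int)

-- ===== PORT B =====
def solution_alt (arr : List Int) : Int :=
  let n : Int := arr.length
  let s := arr.foldl (fun (s : List Int × Int) j =>
      if j < 0 then (s.1, s.2 + 1)
      else if j < 256 then (s.1.set j.toNat (s.1.getD j.toNat 0 + 1), s.2)
      else s) (List.replicate 256 (0 : Int), (0 : Int))
  let vals := (PySem.List.pyRange 0 256 1).foldl (fun (r : List Int × Int) i =>
      let v := n - 2 * r.2
      (r.1 ++ [if v < 0 then (999 : Int) else v], r.2 + s.1.getD i.toNat 0)) (([] : List Int), s.2)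
  (((PySem.List.index? vals.1 ((PySem.List.min? vals.1 (fun x => x)).getD 0)).getD 0 : Nat) : Int)

-- ===== PRECONDITION & SPEC =====
def Spec_solution (arr : List Int) (out : Int) : Prop := out = solution_alt arr
instance (arr : List Int) (out : Int) : Decidable (Spec_solution arr out) := by unfold Spec_solution; infer_instance

-- ===== CLAIM (what is proved, stated in full; the proofs are below) =====
def Claim_equal_solution : Prop := ∀ (arr : List Int), Dom_solution arr → Spec_solution arr (solution arr)

-- ===== LEMMAS AND PROOFS =====

-- the intended per-candidate value: n - 2·#(elements < i), clipped to 999 when negative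
def pvG (arr : List Int) (i : Int) : Int :=
  let v : Int := (arr.length : Int) - 2 * (arr.countP (fun j => decide (j < i)) : Int)
  if v < 0 then 999 else v

theorem pv_foldl_app {α : Type} (f : α → Int) :
    ∀ (l : List α) (acc : List Int),
      l.foldl (fun c i => c ++ [f i]) acc = acc ++ l.map f := by
  intro l
  induction l with
  | nil => simp
  | cons x t ih => intro acc; simp [List.foldl, ih]

theorem pv_inner_len (i : Int) :
    ∀ (l : List Int) (s : List Int × List Int),
      (l.foldl (fun (s : List Int × List Int) j =>
          if j ≥ i then (s.1 ++ [i], s.2) else (s.1, s.2 ++ [j])) s).1.length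
        = s.1.length + l.countP (fun j => decide (i ≤ j)) ∧
      (l.foldl (fun (s : List Int × List Int) j =>
          if j ≥ i then (s.1 ++ [i], s.2) else (s.1, s.2 ++ [j])) s).2.length
        = s.2.length + l.countP (fun j => decide (j < i)) := by
  intro l
  induction l with
  | nil => simp
  | cons x t ih =>
    intro s
    by_cases hx : i ≤ x
    · have h1 : ¬ (x < i) := by omega
      simp [List.foldl, hx, h1, ih]
      omega
    · have h1 : x < i := by omega
      simp [List.foldl, hx, h1, ih]
      omega

theorem pv_countP_split (i : Int) (l : List Int) :
    l.countP (fun j => decide (i ≤ j)) + l.countP (fun j => decide (j < i)) = l.length := by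
  induction l with
  | nil => simp
  | cons x t ih =>
    by_cases hx : i ≤ x
    · have : ¬ (x < i) := by omega
      simp [hx, this]; omega
    · have : x < i := by omega
      simp [hx, this]; omega

theorem pv_cnt_succ (arr : List Int) (a : Int) :
    arr.countP (fun j => decide (j < a + 1))
      = arr.countP (fun j => decide (j < a)) + arr.countP (fun j => decide (j = a)) := by
  induction arr with
  | nil => simp
  | cons x t ih =>
    simp only [List.countP_cons, ih]
    by_cases h1 : x < a <;> by_cases h4 : x = a <;>
      simp only [decide_eq_true_eq, h1, h4, if_true, if_false] <;>
      · split_ifs <;> omega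

-- invariant of B's first loop: histogram and negative count
theorem pv_hist_inv :
    ∀ (l : List Int) (st : List Int × Int), st.1.length = 256 →
      (l.foldl (fun (s : List Int × Int) j =>
          if j < 0 then (s.1, s.2 + 1)
          else if j < 256 then (s.1.set j.toNat (s.1.getD j.toNat 0 + 1), s.2)
          else s) st).1.length = 256 ∧
      (∀ k : Nat, k < 256 →
        (l.foldl (fun (s : List Int × Int) j =>
            if j < 0 then (s.1, s.2 + 1)
            else if j < 256 then (s.1.set j.toNat (s.1.getD j.toNat 0 + 1), s.2)
            else s) st).1.getD k 0
          = st.1.getD k 0 + (l.countP (fun j => decide (j = (k : Int))) : Int)) ∧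
      (l.foldl (fun (s : List Int × Int) j =>
          if j < 0 then (s.1, s.2 + 1)
          else if j < 256 then (s.1.set j.toNat (s.1.getD j.toNat 0 + 1), s.2)
          else s) st).2 = st.2 + (l.countP (fun j => decide (j < 0)) : Int) := by
  intro l
  induction l with
  | nil => intro st h; simp [h]
  | cons x t ih =>
    intro st h
    rw [List.foldl_cons]
    by_cases hx : x < 0
    · have hst : (if x < 0 then (st.1, st.2 + 1)
          else if x < 256 then (st.1.set x.toNat (st.1.getD x.toNat 0 + 1), st.2)
          else st) = (st.1, st.2 + 1) := by simp [hx]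
      rw [hst]
      have key := ih (st.1, st.2 + 1) h
      refine ⟨key.1, ?_, ?_⟩
      · intro k hk
        have hne : decide (x = (k : Int)) = false := by
          simp only [decide_eq_false_iff_not]; omega
        rw [key.2.1 k hk, List.countP_cons, hne]
        simp
      · have hpos : decide (x < (0:Int)) = true := by
          simp only [decide_eq_true_eq]; exact hx
        rw [key.2.2, List.countP_cons, hpos]
        simp; omega
    · by_cases hx2 : x < 256
      · have hst : (if x < 0 then (st.1, st.2 + 1)
            else if x < 256 then (st.1.set x.toNat (st.1.getD x.toNat 0 + 1), st.2)
            else st) = (st.1.set x.toNat (st.1.getD x.toNat 0 + 1), st.2) := by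
          simp [hx, hx2]
        rw [hst]
        have hlen : (st.1.set x.toNat (st.1.getD x.toNat 0 + 1)).length = 256 := by simp [h]
        have key := ih (st.1.set x.toNat (st.1.getD x.toNat 0 + 1), st.2) hlen
        refine ⟨key.1, ?_, ?_⟩
        · intro k hk
          rw [key.2.1 k hk]
          by_cases hk2 : k = x.toNat
          · have heq : decide (x = (k : Int)) = true := by
              simp only [decide_eq_true_eq]; omega
            have hklen : k < st.1.length := by omega
            have hgd : (st.1.set x.toNat (st.1.getD x.toNat 0 + 1)).getD k 0
                = st.1.getD k 0 + 1 := by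
              subst hk2
              rw [List.getD_eq_getElem _ _ (by simpa [h] using hklen),
                  List.getElem_set_self, List.getD_eq_getElem _ _ hklen]
            rw [hgd, List.countP_cons, heq]
            simp; omega
          · have hne : decide (x = (k : Int)) = false := by
              simp only [decide_eq_false_iff_not]; omega
            have hgd : (st.1.set x.toNat (st.1.getD x.toNat 0 + 1)).getD k 0
                = st.1.getD k 0 := by
              by_cases hklen : k < st.1.length
              · rw [List.getD_eq_getElem _ _ (by simpa using hklen),
                    List.getElem_set_ne (by omega), List.getD_eq_getElem _ _ hklen]
              · rw [List.getD_eq_default _ _ (by simpa using (not_lt.mp hklen)),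
                    List.getD_eq_default _ _ (not_lt.mp hklen)]
            rw [hgd, List.countP_cons, hne]
            simp
        · have hpos : decide (x < (0:Int)) = false := by
            simp only [decide_eq_false_iff_not]; omega
          rw [key.2.2, List.countP_cons, hpos]
          simp
      · have hst : (if x < 0 then (st.1, st.2 + 1)
            else if x < 256 then (st.1.set x.toNat (st.1.getD x.toNat 0 + 1), st.2)
            else st) = st := by simp [hx, hx2]
        rw [hst]
        have key := ih st h
        refine ⟨key.1, ?_, ?_⟩
        · intro k hk
          have hne : decide (x = (k : Int)) = false := by
            simp only [decide_eq_false_iff_not]; omega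
          rw [key.2.1 k hk, List.countP_cons, hne]
          simp
        · have hpos : decide (x < (0:Int)) = false := by
            simp only [decide_eq_false_iff_not]; omega
          rw [key.2.2, List.countP_cons, hpos]
          simp

-- proof-only names for the two intermediate lists and the shared final step
def pvFold1 (arr : List Int) : List Int × Int :=
  arr.foldl (fun (s : List Int × Int) j =>
      if j < 0 then (s.1, s.2 + 1)
      else if j < 256 then (s.1.set j.toNat (s.1.getD j.toNat 0 + 1), s.2)
      else s) (List.replicate 256 (0 : Int), (0 : Int))

def pvVals (arr : List Int) : List Int :=
  ((PySem.List.pyRange 0 256 1).foldl (fun (r : List Int × Int) i =>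
      let v := (arr.length : Int) - 2 * r.2
      (r.1 ++ [if v < 0 then (999 : Int) else v], r.2 + (pvFold1 arr).1.getD i.toNat 0))
    (([] : List Int), (pvFold1 arr).2)).1

def pvCnt (arr : List Int) : List Int :=
  (PySem.List.pyRange 0 256 1).foldl (fun cnt i =>
      let p := (PySem.List.sorted arr (fun x => x) false).foldl (fun (s : List Int × List Int) j =>
          if j ≥ i then (s.1 ++ [i], s.2) else (s.1, s.2 ++ [j])) ([], [])
      let val : Int := (p.1.length : Int) - (p.2.length : Int)
      let val := if val < 0 then (999 : Int) else val
      cnt ++ [val]) ([] : List Int)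

def pvF (l : List Int) : Int :=
  (((PySem.List.index? l ((PySem.List.min? l (fun x => x)).getD 0)).getD 0 : Nat) : Int)

-- B's second loop produces the mapped values, given the histogram facts
theorem pv_loop2 (arr : List Int) (hist : List Int)
    (hh : ∀ k : Nat, k < 256 → hist.getD k 0 = (arr.countP (fun j => decide (j = (k : Int))) : Int)) :
    ∀ (m : Nat) (a : Int) (acc : List Int) (lt : Int), a = 256 - (m : Int) → (m : Int) ≤ 256 →
      lt = (arr.countP (fun j => decide (j < a)) : Int) →
      ((PySem.List.pyRange a 256 1).foldl (fun (r : List Int × Int) i =>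
          let v := (arr.length : Int) - 2 * r.2
          (r.1 ++ [if v < 0 then (999 : Int) else v], r.2 + hist.getD i.toNat 0)) (acc, lt)).1
        = acc ++ (PySem.List.pyRange a 256 1).map (pvG arr) := by
  intro m
  induction m with
  | zero =>
    intro a acc lt ha hm hlt
    have : (256 : Int) ≤ a := by omega
    rw [PySem.List.pyRange_one_eq_nil this]
    simp
  | succ p ih =>
    intro a acc lt ha hm hlt
    have hab : a < 256 := by omega
    rw [PySem.List.pyRange_one_cons hab]
    simp only [List.foldl, List.map]
    have hstep : lt + hist.getD a.toNat 0
        = (arr.countP (fun j => decide (j < a + 1)) : Int) := by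
      have ha0 : (0 : Int) ≤ a := by omega
      have hcast : ((a.toNat : Int)) = a := Int.toNat_of_nonneg ha0
      have := hh a.toNat (by omega)
      rw [hlt, this, pv_cnt_succ arr a]
      push_cast
      rw [hcast]
    have := ih (a + 1) (acc ++ [if (arr.length : Int) - 2 * lt < 0 then (999 : Int)
        else (arr.length : Int) - 2 * lt]) (lt + hist.getD a.toNat 0)
        (by omega) (by omega) hstep
    rw [this]
    have hg : pvG arr a = if (arr.length : Int) - 2 * lt < 0 then (999 : Int)
        else (arr.length : Int) - 2 * lt := by
      simp [pvG, hlt]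
    rw [hg]
    simp

-- A's cnt list is the same mapped list
theorem pv_cntA (arr : List Int) :
    pvCnt arr = (PySem.List.pyRange 0 256 1).map (pvG arr) := by
  unfold pvCnt
  rw [pv_foldl_app (f := fun i =>
      let p := (PySem.List.sorted arr (fun x => x) false).foldl (fun (s : List Int × List Int) j =>
          if j ≥ i then (s.1 ++ [i], s.2) else (s.1, s.2 ++ [j])) ([], [])
      let val : Int := (p.1.length : Int) - (p.2.length : Int)
      if val < 0 then (999 : Int) else val)]
  simp only [List.nil_append]
  apply List.map_congr_left
  intro i _
  have hperm : (PySem.List.sorted arr (fun x => x) false).Perm arr :=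
    PySem.List.sorted_perm arr (fun x => x) false
  have hc1 : (PySem.List.sorted arr (fun x => x) false).countP (fun j => decide (i ≤ j))
      = arr.countP (fun j => decide (i ≤ j)) := hperm.countP_eq _
  have hc2 : (PySem.List.sorted arr (fun x => x) false).countP (fun j => decide (j < i))
      = arr.countP (fun j => decide (j < i)) := hperm.countP_eq _
  have hinner := pv_inner_len i (PySem.List.sorted arr (fun x => x) false) ([], [])
  simp only [hinner.1, hinner.2, List.length_nil, Nat.zero_add, hc1, hc2]
  have hlen := hperm.length_eq
  have hsplit := pv_countP_split i arr
  have hval : ((arr.countP (fun j => decide (i ≤ j)) : Int))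
      - (arr.countP (fun j => decide (j < i)) : Int)
      = (arr.length : Int) - 2 * (arr.countP (fun j => decide (j < i)) : Int) := by
    omega
  simp only [pvG, hval]

-- B's vals list equals the same mapped list
theorem pv_valsB (arr : List Int) :
    pvVals arr = (PySem.List.pyRange 0 256 1).map (pvG arr) := by
  have hinv := pv_hist_inv arr (List.replicate 256 (0 : Int), (0 : Int))
      (by exact List.length_replicate)
  have hh : ∀ k : Nat, k < 256 → (pvFold1 arr).1.getD k 0
      = (arr.countP (fun j => decide (j = (k : Int))) : Int) := by
    intro k hk
    have := hinv.2.1 k hk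
    rw [pvFold1, this]
    have hz : (List.replicate 256 (0 : Int)).getD k 0 = 0 := by
      rw [List.getD_eq_getElem _ _ (by rw [List.length_replicate]; exact hk)]
      rw [List.getElem_replicate]
    rw [show (List.replicate 256 (0 : Int), (0 : Int)).1 = List.replicate 256 (0 : Int) from rfl, hz]
    ring
  have hneg : (pvFold1 arr).2 = (arr.countP (fun j => decide (j < 0)) : Int) := by
    have := hinv.2.2
    rw [pvFold1, this]
    ring
  have hvals := pv_loop2 arr (pvFold1 arr).1 hh 256 0 [] ((pvFold1 arr).2)
      (by norm_num) (by norm_num) hneg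
  rw [pvVals, hvals, List.nil_append]

-- ===== VERDICT (by name: the statement is the Claim_ definition above) =====
theorem solution_spec : Claim_equal_solution := by
  intro arr _
  have eA : solution arr = pvF (pvCnt arr) := rfl
  have eB : solution_alt arr = pvF (pvVals arr) := rfl
  unfold Spec_solution
  rw [eA, eB, pv_cntA, pv_valsB]
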